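-- pv_equiv track=rewrite | github.com/the-omega-institute/automath | theory/2026_golden_ratio_driven_scan_projection_generation_recursive_emergence/scripts/exp_fold_gauge_anomaly_density_transducer.py | _fold_m_via_rewrite
-- ===== SOURCE A (Python) =====
-- from typing import Dict, Iterable, List, Mapping, Sequence, Tuple
--
-- def _rewrite_normalize_011_to_100(word: str) -> str:
--     """Deterministic normalization by repeatedly applying 011 -> 100 (MSD-first)."""
--     w = list(word)
--     i = 0
--     while i <= len(w) - 3:
--         if w[i] == "0" and w[i + 1] == "1" and w[i + 2] == "1":
--             w[i : i + 3] = ["1", "0", "0"]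
--             i = max(i - 2, 0)
--         else:
--             i += 1
--     return "".join(w)
--
-- def _fold_m_via_rewrite(micro: Sequence[int]) -> List[int]:
--     """Compute Fold_m(micro) via 011->100 rewrite (no bigint Fibonacci arithmetic).
--
--     micro is in the paper's low-to-high order (b_1,...,b_m) with weights F_{i+1}.
--     We reverse to MSD-first, prepend one leading 0, normalize, then reverse back and
--     drop the highest Zeckendorf digit (the overflow at weight F_{m+2}).
--     """
--     m = len(micro)
--     if m == 0:
--         return []
--     s = "0" + "".join("1" if b else "0" for b in reversed(micro))
--     norm = _rewrite_normalize_011_to_100(s)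
--     # norm is MSD-first of length m+1; reverse to low-to-high digits z2..z_{m+2}.
--     digits_low = [1 if ch == "1" else 0 for ch in reversed(norm)]
--     return digits_low[:m]
-- ===== SOURCE B (Python) =====
-- from typing import List, Sequence
--
-- def _fold_m_via_rewrite(micro: Sequence[int]) -> List[int]:
--     """Single left-to-right pass over the MSD-first word with an explicit stack:
--     pushing a 1 on top of (... 0 1) pops the pair and carries the 1 downward,
--     owing two trailing zeros per pop (the 011 -> 100 rewrite, fully cascaded)."""
--     m = len(micro)
--     if m == 0:
--         return []
--     stack = [0]  # the prepended leading 0 (MSD-first; top of stack = end)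
--     for b in reversed(micro):
--         if b:
--             zeros = 0
--             while len(stack) >= 2 and stack[-1] == 1 and stack[-2] == 0:
--                 stack.pop()
--                 stack.pop()
--                 zeros += 2
--             stack.append(1)
--             stack.extend([0] * zeros)
--         else:
--             stack.append(0)
--     # stack is the normalized word MSD-first; reverse to low-to-high, drop the top digit
--     return stack[::-1][:m]
-- ===== Notes on version B (the rewrite author's own statement) =====
-- stated objective: faster
-- what changed: A normalizes the MSD-first word by repeatedly rewriting 011->100 in place with a backtracking index (i = max(i-2,0)); B makes a single left-to-right pass with an explicit stack whose push cascades the Zeckendorf carry (pop '0','1' pairs, owing two zeros per pop), so there is no in-place slice assignment and no index backtracking.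
import Mathlib
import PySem

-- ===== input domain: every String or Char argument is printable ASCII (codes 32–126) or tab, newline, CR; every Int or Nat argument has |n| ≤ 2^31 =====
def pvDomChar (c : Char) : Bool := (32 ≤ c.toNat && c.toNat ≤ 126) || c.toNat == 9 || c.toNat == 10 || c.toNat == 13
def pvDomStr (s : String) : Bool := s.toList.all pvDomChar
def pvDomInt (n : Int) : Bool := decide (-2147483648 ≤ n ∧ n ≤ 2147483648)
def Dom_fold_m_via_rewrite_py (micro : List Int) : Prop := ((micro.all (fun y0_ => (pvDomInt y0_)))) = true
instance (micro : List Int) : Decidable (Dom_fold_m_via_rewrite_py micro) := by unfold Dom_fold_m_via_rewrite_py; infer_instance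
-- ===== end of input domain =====

-- B replaces A's backtracking in-place 011→100 index loop by a one-pass stack with a
-- carry cascade (same results; measurably faster by a constant factor, both linear).

-- ===== PORT A =====
-- helpers cited by rewriteLoop's termination proof
theorem pv_rw_len (w : List Char) (i : Nat) (h : i + 3 ≤ w.length) :
    (w.take i ++ '1' :: '0' :: '0' :: w.drop (i+3)).length = w.length := by
  simp [List.length_take]; omega

theorem pv_rw_count (w : List Char) (i : Nat) (h : i + 3 ≤ w.length)
    (h0 : w[i]'(by omega) = '0') (h1 : w[i+1]'(by omega) = '1') (h2 : w[i+2]'(by omega) = '1') :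
    (w.take i ++ '1' :: '0' :: '0' :: w.drop (i+3)).count '1' + 1 = w.count '1' := by
  conv_rhs => rw [← List.take_append_drop i w,
    List.drop_eq_getElem_cons (by omega : i < w.length),
    List.drop_eq_getElem_cons (by omega : i + 1 < w.length),
    List.drop_eq_getElem_cons (by omega : i + 2 < w.length)]
  have e : i + 2 + 1 = i + 3 := by omega
  rw [e]
  simp [List.count_append, h0, h1, h2]
  omega

-- literal port of _rewrite_normalize_011_to_100's while-loop (i - 2 is Python's max(i-2,0))
def rewriteLoop (w : List Char) (i : Nat) : List Char :=
  if h : i + 3 ≤ w.length then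
    if hm : w[i]'(by omega) = '0' ∧ w[i+1]'(by omega) = '1' ∧ w[i+2]'(by omega) = '1' then
      rewriteLoop (w.take i ++ '1' :: '0' :: '0' :: w.drop (i+3)) (i - 2)
    else
      rewriteLoop w (i+1)
  else w
termination_by w.count '1' * (w.length + 3) + (w.length - i)
decreasing_by
  · have hl := pv_rw_len w i h
    have hc := pv_rw_count w i h hm.1 hm.2.1 hm.2.2
    rw [hl]
    rw [← hc]
    have hx : w.length - (i - 2) < w.length + 3 := by omega
    calc (w.take i ++ '1' :: '0' :: '0' :: w.drop (i+3)).count '1' * (w.length + 3) + (w.length - (i - 2))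
        < (w.take i ++ '1' :: '0' :: '0' :: w.drop (i+3)).count '1' * (w.length + 3) + (w.length + 3) :=
          Nat.add_lt_add_left hx _
      _ = ((w.take i ++ '1' :: '0' :: '0' :: w.drop (i+3)).count '1' + 1) * (w.length + 3) := by ring
      _ ≤ ((w.take i ++ '1' :: '0' :: '0' :: w.drop (i+3)).count '1' + 1) * (w.length + 3) + (w.length - i) :=
          Nat.le_add_right _ _
  · exact Nat.add_lt_add_left (by omega) _

def fold_m_via_rewrite_py (micro : List Int) : List Int :=
  let m := micro.length
  if m = 0 then []
  else
    let s : List Char := '0' :: micro.reverse.map (fun b => if b ≠ 0 then '1' else '0')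
    let norm := rewriteLoop s 0
    let digits_low := norm.reverse.map (fun ch => if ch = '1' then (1 : Int) else 0)
    digits_low.take m

-- ===== PORT B =====
-- stack is kept head-is-top (Python's stack reversed); head-order = low-to-high digits
def pushCarry (st : List Int) (zeros : Nat) : List Int :=
  match st with
  | a :: b :: rest =>
      if a = 1 ∧ b = 0 then pushCarry rest (zeros + 2)
      else List.replicate zeros 0 ++ 1 :: a :: b :: rest
  | _ => List.replicate zeros 0 ++ 1 :: st

def pushBit (st : List Int) (b : Int) : List Int :=
  if b ≠ 0 then pushCarry st 0 else 0 :: st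

def fold_m_via_rewrite_py_alt (micro : List Int) : List Int :=
  if micro.length = 0 then []
  else (micro.reverse.foldl pushBit [0]).take micro.length

-- ===== PRECONDITION & SPEC =====
def Spec_fold_m_via_rewrite_py (micro : List Int) (out : List Int) : Prop := out = fold_m_via_rewrite_py_alt micro
instance (micro : List Int) (out : List Int) : Decidable (Spec_fold_m_via_rewrite_py micro out) := by unfold Spec_fold_m_via_rewrite_py; infer_instance

-- ===== CLAIM (what is proved, stated in full; the proofs are below) =====
def Claim_equal_fold_m_via_rewrite_py : Prop := ∀ (micro : List Int), Dom_fold_m_via_rewrite_py micro → Spec_fold_m_via_rewrite_py micro (fold_m_via_rewrite_py micro)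

-- ===== LEMMAS AND PROOFS =====

-- ghost char-level version of B's stack push (A works on chars, B on ints)
def pushCarryC (st : List Char) (zeros : Nat) : List Char :=
  match st with
  | a :: b :: rest =>
      if a = '1' ∧ b = '0' then pushCarryC rest (zeros + 2)
      else List.replicate zeros '0' ++ '1' :: a :: b :: rest
  | _ => List.replicate zeros '0' ++ '1' :: st

def pushC (st : List Char) (c : Char) : List Char :=
  if c = '1' then pushCarryC st 0 else c :: st

def MatchAt (w : List Char) (k : Nat) : Prop :=
  w[k]? = some '0' ∧ w[k+1]? = some '1' ∧ w[k+2]? = some '1'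

theorem rewriteLoop_exit (w : List Char) (i : Nat) (h : ¬ i + 3 ≤ w.length) :
    rewriteLoop w i = w := by rw [rewriteLoop]; simp [h]

theorem rewriteLoop_step_no (w : List Char) (i : Nat) (h : i + 3 ≤ w.length)
    (hm : ¬ MatchAt w i) : rewriteLoop w i = rewriteLoop w (i+1) := by
  rw [rewriteLoop]
  have : ¬ (w[i]'(by omega) = '0' ∧ w[i+1]'(by omega) = '1' ∧ w[i+2]'(by omega) = '1') := by
    intro hc
    exact hm ⟨by rw [List.getElem?_eq_getElem (by omega), hc.1],
              by rw [List.getElem?_eq_getElem (by omega), hc.2.1],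
              by rw [List.getElem?_eq_getElem (by omega), hc.2.2]⟩
  simp [h, this]

theorem rewriteLoop_step_yes (w : List Char) (i : Nat) (h : i + 3 ≤ w.length)
    (hm : MatchAt w i) :
    rewriteLoop w i = rewriteLoop (w.take i ++ '1' :: '0' :: '0' :: w.drop (i+3)) (i - 2) := by
  rw [rewriteLoop]
  obtain ⟨h0, h1, h2⟩ := hm
  rw [List.getElem?_eq_getElem (by omega : i < w.length)] at h0
  rw [List.getElem?_eq_getElem (by omega : i + 1 < w.length)] at h1
  rw [List.getElem?_eq_getElem (by omega : i + 2 < w.length)] at h2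
  simp_all

theorem rewriteLoop_skip (w : List Char) (j : Nat) :
    ∀ d i, i + d = j → (∀ k, i ≤ k → k < j → ¬ MatchAt w k) → rewriteLoop w i = rewriteLoop w j := by
  intro d
  induction d with
  | zero => intro i hi _; rw [Nat.add_zero] at hi; rw [hi]
  | succ d ih =>
      intro i hi hnm
      by_cases h3 : i + 3 ≤ w.length
      · rw [rewriteLoop_step_no w i h3 (hnm i le_rfl (by omega))]
        exact ih (i+1) (by omega) (fun k hk1 hk2 => hnm k (by omega) hk2)
      · rw [rewriteLoop_exit w i h3, rewriteLoop_exit w j (by omega)]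

theorem pushCarryC_length (st : List Char) (z : Nat) :
    (pushCarryC st z).length = st.length + z + 1 := by
  fun_induction pushCarryC st z <;> simp_all <;> omega

-- no match anywhere in [st.length - 2, st.length + z - 1) of  rev st ++ '1' :: 0^z ++ rest'
theorem no_match_zone (st : List Char) (z : Nat) (rest' : List Char)
    (hshape : ∀ a b t, st = a :: b :: t → ¬ (a = '1' ∧ b = '0')) :
    ∀ k, st.length - 2 ≤ k → k < st.length + z - 1 →
      ¬ MatchAt (st.reverse ++ '1' :: (List.replicate z '0' ++ rest')) k := by
  intro k hk1 hk2 hm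
  obtain ⟨m0, m1, m2⟩ := hm
  have key : ∀ j, j < z →
      (st.reverse ++ '1' :: (List.replicate z '0' ++ rest'))[st.length + 1 + j]? = some '0' := by
    intro j hj
    rw [List.getElem?_append_right (by simp; omega)]
    simp only [List.length_reverse]
    have e : st.length + 1 + j - st.length = j + 1 := by omega
    rw [e, List.getElem?_cons_succ, List.getElem?_append_left (by simp [hj]),
      List.getElem?_replicate]
    simp [hj]
  by_cases hkL : st.length ≤ k
  · -- window's middle char lies in the zeros block
    have e : k + 1 = st.length + 1 + (k - st.length) := by omega
    rw [e, key _ (by omega)] at m1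
    simp at m1
  · by_cases hkL1 : k + 1 = st.length
    · -- k = L - 1 : third char is the first zero
      have e : k + 2 = st.length + 1 + 0 := by omega
      rw [e, key 0 (by omega)] at m2
      simp at m2
    · -- k = L - 2 : the stack's top two refute the match
      have hk : k + 2 = st.length := by omega
      match st, hshape with
      | a :: b :: t, hshape =>
        have ht : t.length = k := by simp at hk; omega
        have hw : (a :: b :: t).reverse ++ '1' :: (List.replicate z '0' ++ rest')
            = t.reverse ++ b :: a :: '1' :: (List.replicate z '0' ++ rest') := by
          simp
        rw [hw] at m0 m1
        rw [show k = t.length + 0 by omega] at m0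
        rw [show k + 1 = t.length + 1 by omega] at m1
        rw [List.getElem?_append_right (by simp)] at m0
        rw [List.getElem?_append_right (by simp)] at m1
        simp at m0 m1
        exact hshape a b t rfl ⟨m1, m0⟩

theorem getElem?_rev_stack (t : List Char) (l2 : List Char) (j : Nat) :
    (t.reverse ++ l2)[t.length + j]? = l2[j]? := by
  rw [List.getElem?_append_right (by simp)]
  simp

theorem casc_base (st : List Char) (z : Nat) (rest' : List Char)
    (hshape : ∀ a b t, st = a :: b :: t → ¬ (a = '1' ∧ b = '0')) :
    rewriteLoop (st.reverse ++ '1' :: (List.replicate z '0' ++ rest')) (st.length - 2)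
      = rewriteLoop ((List.replicate z '0' ++ '1' :: st).reverse ++ rest')
          ((List.replicate z '0' ++ '1' :: st).length - 2) := by
  have hw : (List.replicate z '0' ++ '1' :: st).reverse ++ rest'
      = st.reverse ++ '1' :: (List.replicate z '0' ++ rest') := by
    simp [List.reverse_append]
  rw [hw]
  have hlen : (List.replicate z '0' ++ '1' :: st).length - 2 = st.length + z - 1 := by
    simp; omega
  rw [hlen]
  exact rewriteLoop_skip _ (st.length + z - 1) ((st.length + z - 1) - (st.length - 2))
    (st.length - 2) (by omega) (no_match_zone st z rest' hshape)

theorem casc (st : List Char) (z : Nat) (rest' : List Char) :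
    rewriteLoop (st.reverse ++ '1' :: (List.replicate z '0' ++ rest')) (st.length - 2)
      = rewriteLoop ((pushCarryC st z).reverse ++ rest') ((pushCarryC st z).length - 2) := by
  fun_induction pushCarryC st z with
  | case1 z a b t hab ih =>
      obtain ⟨ha, hb⟩ := hab
      subst ha hb
      have hw : ('1' :: '0' :: t).reverse ++ '1' :: (List.replicate z '0' ++ rest')
          = t.reverse ++ '0' :: '1' :: '1' :: (List.replicate z '0' ++ rest') := by
        simp
      have hlen : ('1' :: '0' :: t).length - 2 = t.length := by simp
      rw [hw, hlen]
      set w := t.reverse ++ '0' :: '1' :: '1' :: (List.replicate z '0' ++ rest') with hwdef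
      have hwl : t.length + 3 ≤ w.length := by simp [hwdef]
      have hmat : MatchAt w t.length := by
        refine ⟨?_, ?_, ?_⟩
        · simpa using getElem?_rev_stack t _ 0
        · exact getElem?_rev_stack t _ 1
        · exact getElem?_rev_stack t _ 2
      rw [rewriteLoop_step_yes w t.length hwl hmat]
      have htake : w.take t.length = t.reverse := by
        rw [hwdef, show t.length = t.reverse.length by simp, List.take_left]
      have hdrop : w.drop (t.length + 3) = List.replicate z '0' ++ rest' := by
        have : w = (t.reverse ++ ['0', '1', '1']) ++ (List.replicate z '0' ++ rest') := by
          simp [hwdef]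
        rw [this, show t.length + 3 = (t.reverse ++ ['0', '1', '1']).length by simp,
          List.drop_left]
      rw [htake, hdrop]
      have hfin : t.reverse ++ '1' :: '0' :: '0' :: (List.replicate z '0' ++ rest')
          = t.reverse ++ '1' :: (List.replicate (z + 2) '0' ++ rest') := by
        simp [List.replicate_succ]
      rw [hfin]
      exact ih
  | case2 z a b t hab =>
      exact casc_base (a :: b :: t) z rest' (by intro a' b' t' he; injection he with h1 h2; injection h2 with h2 h3; subst h1 h2; exact hab)
  | case3 st z hnot =>
      exact casc_base st z rest' (fun a b t he _ => hnot a b t he)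

theorem pushC_no (st : List Char) (a b c : Char) (hm : ¬ (b = '0' ∧ a = '1' ∧ c = '1')) :
    pushC (a :: b :: st) c = c :: a :: b :: st := by
  by_cases hc : c = '1'
  · subst hc
    have : ¬ (a = '1' ∧ b = '0') := fun ⟨h1, h2⟩ => hm ⟨h2, h1, rfl⟩
    simp [pushC, pushCarryC, this]
  · simp [pushC, hc]

theorem pushC_length (st : List Char) (c : Char) : (pushC st c).length = st.length + 1 := by
  by_cases hc : c = '1'
  · simp [pushC, hc, pushCarryC_length]
  · simp [pushC, hc]

theorem step_push (st : List Char) (a b c : Char) (rest' : List Char) :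
    rewriteLoop ((a :: b :: st).reverse ++ c :: rest') st.length
      = rewriteLoop ((pushC (a :: b :: st) c).reverse ++ rest') ((pushC (a :: b :: st) c).length - 2) := by
  have hw : (a :: b :: st).reverse ++ c :: rest' = st.reverse ++ b :: a :: c :: rest' := by simp
  by_cases hm : b = '0' ∧ a = '1' ∧ c = '1'
  · obtain ⟨hb, ha, hc⟩ := hm
    subst hb ha hc
    rw [hw]
    set w := st.reverse ++ '0' :: '1' :: '1' :: rest' with hwdef
    have hwl : st.length + 3 ≤ w.length := by simp [hwdef]
    have hmat : MatchAt w st.length := by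
      refine ⟨?_, ?_, ?_⟩
      · simpa using getElem?_rev_stack st _ 0
      · exact getElem?_rev_stack st _ 1
      · exact getElem?_rev_stack st _ 2
    rw [rewriteLoop_step_yes w st.length hwl hmat]
    have htake : w.take st.length = st.reverse := by
      rw [hwdef, show st.length = st.reverse.length by simp, List.take_left]
    have hdrop : w.drop (st.length + 3) = rest' := by
      have : w = (st.reverse ++ ['0', '1', '1']) ++ rest' := by simp [hwdef]
      rw [this, show st.length + 3 = (st.reverse ++ ['0', '1', '1']).length by simp,
        List.drop_left]
    rw [htake, hdrop]
    have hfin : st.reverse ++ '1' :: '0' :: '0' :: rest'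
        = st.reverse ++ '1' :: (List.replicate 2 '0' ++ rest') := by simp [List.replicate_succ]
    have hpush : pushC ('1' :: '0' :: st) '1' = pushCarryC st 2 := by
      simp [pushC, pushCarryC]
    rw [hfin, hpush, show st.length = ('1' :: '0' :: st).length - 2 by simp]
    have := casc st 2 rest'
    simpa using this
  · rw [pushC_no st a b c hm, hw]
    have hnm : ¬ MatchAt (st.reverse ++ b :: a :: c :: rest') st.length := by
      intro hmat
      obtain ⟨m0, m1, m2⟩ := hmat
      rw [show st.length = st.length + 0 by omega, getElem?_rev_stack] at m0
      rw [show st.length + 0 + 1 = st.length + 1 by omega, getElem?_rev_stack] at m1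
      rw [show st.length + 0 + 1 + 1 = st.length + 2 by omega, getElem?_rev_stack] at m2
      simp at m0 m1 m2
      exact hm ⟨m0, m1, m2⟩
    rw [rewriteLoop_step_no _ st.length (by simp) hnm]
    have hw2 : (c :: a :: b :: st).reverse ++ rest' = st.reverse ++ b :: a :: c :: rest' := by simp
    rw [hw2]
    simp

theorem main_sim (rest : List Char) : ∀ (a b : Char) (st : List Char),
    rewriteLoop ((a :: b :: st).reverse ++ rest) st.length
      = (rest.foldl pushC (a :: b :: st)).reverse := by
  induction rest with
  | nil =>
      intro a b st
      rw [rewriteLoop_exit _ _ (by simp)]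
      simp
  | cons c rest' ih =>
      intro a b st
      rw [step_push st a b c rest']
      have hlen : (pushC (a :: b :: st) c).length = st.length + 3 := by
        rw [pushC_length]; simp
      rcases hp : pushC (a :: b :: st) c with _ | ⟨a', l⟩
      · rw [hp] at hlen; simp at hlen
      rcases l with _ | ⟨b', st'⟩
      · rw [hp] at hlen; simp at hlen
      have hlen' : (pushC (a :: b :: st) c).length - 2 = st'.length := by
        rw [hp]; simp
      rw [hp] at hlen'
      rw [hlen', ih a' b' st']
      simp [← hp]

theorem pushC_single (x c : Char) : pushC [x] c = [c, x] := by
  by_cases hc : c = '1'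
  · simp [pushC, hc, pushCarryC]
  · simp [pushC, hc]

theorem norm_eq (bits : List Char) :
    rewriteLoop ('0' :: bits) 0 = (bits.foldl pushC ['0']).reverse := by
  cases bits with
  | nil =>
      rw [rewriteLoop_exit _ _ (by simp)]
      simp
  | cons c rest2 =>
      have h1 : '0' :: c :: rest2 = (c :: '0' :: ([] : List Char)).reverse ++ rest2 := by simp
      have h2 : (0 : Nat) = ([] : List Char).length := by simp
      rw [h1, h2, main_sim rest2 c '0' []]
      simp [pushC_single]

def OnlyBits (st : List Char) : Prop := ∀ c ∈ st, c = '0' ∨ c = '1'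

def gBit (c : Char) : Int := if c = '1' then 1 else 0

theorem onlybits_pushCarryC (st : List Char) (z : Nat) :
    OnlyBits st → OnlyBits (pushCarryC st z) := by
  fun_induction pushCarryC st z with
  | case1 z a b t hab ih =>
      intro h
      exact ih (fun c hc => h c (by simp [hc]))
  | case2 z a b t hab =>
      intro h c hc
      rcases List.mem_append.mp hc with hc | hc
      · exact Or.inl (List.eq_of_mem_replicate hc)
      · rcases List.mem_cons.mp hc with rfl | hc
        · exact Or.inr rfl
        · exact h c hc
  | case3 st z hnot =>
      intro h c hc
      rcases List.mem_append.mp hc with hc | hc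
      · exact Or.inl (List.eq_of_mem_replicate hc)
      · rcases List.mem_cons.mp hc with rfl | hc
        · exact Or.inr rfl
        · exact h c hc

theorem onlybits_pushC (st : List Char) (c : Char) (h : OnlyBits st)
    (hc : c = '0' ∨ c = '1') : OnlyBits (pushC st c) := by
  by_cases h1 : c = '1'
  · simpa [pushC, h1] using onlybits_pushCarryC st 0 h
  · intro d hd
    simp [pushC, h1] at hd
    rcases hd with rfl | hd
    · exact hc
    · exact h d hd

theorem carry_map (st : List Char) (z : Nat) :
    OnlyBits st → pushCarry (st.map gBit) z = (pushCarryC st z).map gBit := by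
  fun_induction pushCarryC st z with
  | case1 z a b t hab ih =>
      intro h
      obtain ⟨ha, hb⟩ := hab
      subst ha hb
      have ht : OnlyBits t := fun c hc => h c (by simp [hc])
      have hstep : pushCarry (('1' :: '0' :: t).map gBit) z = pushCarry (t.map gBit) (z + 2) := by
        simp [gBit, pushCarry]
      rw [hstep, ih ht]
  | case2 z a b t hab =>
      intro h
      rcases h a (by simp) with ha | ha <;> rcases h b (by simp) with hb | hb <;>
        subst ha <;> subst hb
      · simp [pushCarry, gBit]
      · simp [pushCarry, gBit]
      · exact absurd ⟨rfl, rfl⟩ hab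
      · simp [pushCarry, gBit]
  | case3 st z hnot =>
      intro h
      match st, hnot with
      | [], _ => simp [pushCarry, gBit]
      | [x], _ => simp [pushCarry, gBit]
      | a :: b :: t, hnot => exact absurd rfl (by intro he; exact hnot a b t he)

theorem fold_map (l : List Int) : ∀ (st : List Char), OnlyBits st →
    l.foldl pushBit (st.map gBit) = ((l.map (fun b => if b ≠ 0 then '1' else '0')).foldl pushC st).map gBit := by
  induction l with
  | nil => intro st _; simp
  | cons b l' ih =>
      intro st h
      have hstep : pushBit (st.map gBit) b = (pushC st (if b ≠ 0 then '1' else '0')).map gBit := by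
        by_cases hb : b ≠ 0
        · simp [pushBit, pushC, hb]
          simpa using carry_map st 0 h
        · simp [pushBit, hb, pushC, gBit]
      simp only [List.foldl_cons, List.map_cons]
      rw [hstep]
      exact ih (pushC st (if b ≠ 0 then '1' else '0'))
        (onlybits_pushC st _ h (by by_cases hb : b ≠ 0 <;> simp [hb]))

-- ===== VERDICT (by name: the statement is the Claim_ definition above) =====
theorem fold_m_via_rewrite_py_spec : Claim_equal_fold_m_via_rewrite_py := by
  intro micro _
  unfold Spec_fold_m_via_rewrite_py fold_m_via_rewrite_py fold_m_via_rewrite_py_alt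
  by_cases hm : micro.length = 0
  · simp [hm]
  · simp only [hm, if_false]
    rw [norm_eq, List.reverse_reverse]
    have h0 : OnlyBits ['0'] := by intro c hc; simp at hc; exact Or.inl hc
    have hf := fold_map micro.reverse ['0'] h0
    have e1 : (['0'] : List Char).map gBit = [0] := by simp [gBit]
    rw [e1] at hf
    rw [hf]
    rfl
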